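-- pv_equiv track=rewrite | github.com/abhidsm/flamesgame | flames.py | flames_result
-- ===== SOURCE A (Python) =====
-- def flames_result(count):
--     flames_list = ['F','L','A','M','E','S']
--     while len(flames_list) > 1:
--         remove_count = count
--         if count > len(flames_list):
--             remove_count = count % len(flames_list)
--             if remove_count == 0:
--                 remove_count = len(flames_list)
--         flames_list.remove(flames_list[remove_count - 1])
--         flames_list = flames_list[remove_count - 1:] + flames_list[:remove_count - 1]
--     return flames_list[0]
-- ===== SOURCE B (Python) =====
-- def flames_result(count):
--     letters = ['F', 'L', 'A', 'M', 'E', 'S']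
--     start = 0
--     while len(letters) > 1:
--         n = len(letters)
--         step = count if count <= n else (count % n or n)
--         kill = (start + step - 1) % n
--         letters.pop(kill)
--         start = kill % (n - 1)
--     return letters[0]
-- ===== Notes on version B (the rewrite author's own statement) =====
-- stated objective: alternative
-- what changed: Replaces A's remove-by-value plus slice-and-concatenate rotation each round by a single fixed list with a modular start pointer: each round the absolute kill index is computed arithmetically, popped, and the pointer updated; Pre_ restricts to positive counts, the game's natural domain (counts <= 0 only reach A via Python negative-index/slice wraparound, and A raises IndexError for count <= -2).
-- outside the precondition, e.g. on flames_result(0): A returns 'A', B returns 'F'; on flames_result(-1): A returns 'F', B returns 'L'; on flames_result(-2): A raises IndexError, B returns 'S'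
import Mathlib
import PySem

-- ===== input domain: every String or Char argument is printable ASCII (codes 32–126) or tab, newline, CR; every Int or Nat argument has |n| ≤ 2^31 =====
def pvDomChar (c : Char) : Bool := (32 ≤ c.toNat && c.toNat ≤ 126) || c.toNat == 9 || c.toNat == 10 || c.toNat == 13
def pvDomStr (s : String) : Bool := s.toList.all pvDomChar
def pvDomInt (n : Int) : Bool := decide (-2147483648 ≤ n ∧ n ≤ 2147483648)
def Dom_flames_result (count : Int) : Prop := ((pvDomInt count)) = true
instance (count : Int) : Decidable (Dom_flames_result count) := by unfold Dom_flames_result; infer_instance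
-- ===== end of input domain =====

-- B replaces A's remove-then-slice rotation by a fixed list with a modular
-- start pointer, popping the absolute kill index each round (objective: alternative).

-- ===== PORT A =====
-- one round of A's loop body: remove flames_list[rc-1], then rotate by slicing
def pvStepA (l : List String) (rc : Int) : List String :=
  match PySem.List.pyGet? l (rc - 1) with
  | none => l          -- IndexError in Python; excluded by Pre_
  | some x =>
    let l1 := (PySem.List.remove? l x).getD l
    PySem.List.slice l1 (some (rc - 1)) none ++ PySem.List.slice l1 none (some (rc - 1))

-- the while loop; fuel only makes the recursion total (6 is always enough)
def pvLoopA (count : Int) : Nat → List String → List String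
  | 0, l => l
  | fuel + 1, l =>
    if l.length > 1 then
      let n : Int := (l.length : Int)
      let rc : Int :=
        if count > n then (let m := PySem.Int.mod count n; if m = 0 then n else m)
        else count
      pvLoopA count fuel (pvStepA l rc)
    else l

def flames_result (count : Int) : String :=
  (PySem.List.pyGet? (pvLoopA count 6 ["F","L","A","M","E","S"]) 0).getD ""

-- ===== PORT B =====
def pvLoopB (count : Int) : Nat → List String → Int → List String
  | 0, l, _ => l
  | fuel + 1, l, s =>
    if l.length > 1 then
      let n : Int := (l.length : Int)
      let step : Int :=
        if count > n then (let m := PySem.Int.mod count n; if m = 0 then n else m)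
        else count
      let kill := PySem.Int.mod (s + step - 1) n
      match PySem.List.pop? l kill with
      | none => l
      | some r => pvLoopB count fuel r.2 (PySem.Int.mod kill (n - 1))
    else l

def flames_result_alt (count : Int) : String :=
  (PySem.List.pyGet? (pvLoopB count 6 ["F","L","A","M","E","S"] 0) 0).getD ""

-- ===== PRECONDITION & SPEC =====
-- Pre_ restricts to positive counts, the game's natural domain (letter counts are
-- positive); counts ≤ 0 only reach A via Python negative-index/slice wraparound
-- (A raises IndexError for count ≤ -2 and returns accidental rotations at 0, -1).
def Pre_flames_result (count : Int) : Prop := 1 ≤ count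
instance (count : Int) : Decidable (Pre_flames_result count) := by unfold Pre_flames_result; infer_instance
def pvWitness_flames_result : Int := (2)

def Spec_flames_result (count : Int) (out : String) : Prop := out = flames_result_alt count
instance (count : Int) (out : String) : Decidable (Spec_flames_result count out) := by unfold Spec_flames_result; infer_instance

-- ===== CLAIM (what is proved, stated in full; the proofs are below) =====
def Claim_equal_flames_result : Prop := ∀ (count : Int), Dom_flames_result count → Pre_flames_result count → Spec_flames_result count (flames_result count)

-- ===== LEMMAS AND PROOFS =====

-- finite check: equality on count ∈ [1, 66]
theorem pv_table : ∀ k : Nat, k < 66 → flames_result ((k : Int) + 1) = flames_result_alt ((k : Int) + 1) := by decide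

theorem pv_mod_eq (c c' n : Int) (h2 : 2 ≤ n) (h6 : n ≤ 6)
    (hm : c % 60 = c' % 60) : PySem.Int.mod c n = PySem.Int.mod c' n := by
  have hd : n ∣ 60 := by interval_cases n <;> decide
  rw [@PySem.Int.mod_eq_emod_of_pos c n (by omega), @PySem.Int.mod_eq_emod_of_pos c' n (by omega)]
  rw [← Int.emod_emod_of_dvd c hd, ← Int.emod_emod_of_dvd c' hd, hm]

theorem pv_stepA_len (l : List String) (rc : Int) (h1 : 1 ≤ rc) :
    (pvStepA l rc).length ≤ l.length := by
  unfold pvStepA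
  cases hg : PySem.List.pyGet? l (rc - 1) with
  | none => simp
  | some x =>
    have hx : x ∈ l := PySem.List.mem_of_pyGet?_eq_some l hg
    have hl1 : ((PySem.List.remove? l x).getD l).length ≤ l.length := by
      rw [PySem.List.remove?_eq_some_erase l x hx]
      simpa using List.length_erase_le (l := l) (a := x)
    simp only []
    rw [PySem.List.slice_from _ (by omega : (0:Int) ≤ rc - 1),
        PySem.List.slice_to _ (by omega : (0:Int) ≤ rc - 1)]
    simp only [List.length_append, List.length_drop, List.length_take]
    omega

theorem pv_loopA_congr (c c' : Int) (h7 : 7 ≤ c) (h7' : 7 ≤ c') (hm : c % 60 = c' % 60) :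
    ∀ fuel (l : List String), l.length ≤ 6 → pvLoopA c fuel l = pvLoopA c' fuel l := by
  intro fuel
  induction fuel with
  | zero => intro l _; rfl
  | succ fuel ih =>
    intro l hl
    unfold pvLoopA
    by_cases hg : l.length > 1
    · simp only [hg, if_true]
      have hgt : c > (l.length : Int) := by omega
      have hgt' : c' > (l.length : Int) := by omega
      have hmod : PySem.Int.mod c (l.length : Int) = PySem.Int.mod c' (l.length : Int) :=
        pv_mod_eq c c' _ (by exact_mod_cast hg) (by exact_mod_cast hl) hm
      simp only [if_pos hgt, if_pos hgt', hmod]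
      set m := PySem.Int.mod c' (l.length : Int) with hmdef
      have hrc1 : 1 ≤ (if m = 0 then (l.length : Int) else m) := by
        have hpos : 0 < (l.length : Int) := by omega
        have := @PySem.Int.mod_eq_emod_of_pos c' (l.length:Int) hpos
        have h0 : 0 ≤ m := by rw [hmdef, this]; exact Int.emod_nonneg c' (by omega)
        split_ifs with h <;> omega
      exact ih _ (le_trans (pv_stepA_len l _ hrc1) hl)
    · simp only [hg, if_false]

theorem pv_loopB_congr (c c' : Int) (h7 : 7 ≤ c) (h7' : 7 ≤ c') (hm : c % 60 = c' % 60) :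
    ∀ fuel (l : List String) (s : Int), l.length ≤ 6 → pvLoopB c fuel l s = pvLoopB c' fuel l s := by
  intro fuel
  induction fuel with
  | zero => intro l s _; rfl
  | succ fuel ih =>
    intro l s hl
    unfold pvLoopB
    by_cases hg : l.length > 1
    · simp only [hg, if_true]
      have hgt : c > (l.length : Int) := by omega
      have hgt' : c' > (l.length : Int) := by omega
      have hmod : PySem.Int.mod c (l.length : Int) = PySem.Int.mod c' (l.length : Int) :=
        pv_mod_eq c c' _ (by exact_mod_cast hg) (by exact_mod_cast hl) hm
      simp only [if_pos hgt, if_pos hgt', hmod]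
      cases hp : PySem.List.pop? l (PySem.Int.mod (s + (if PySem.Int.mod c' (l.length:Int) = 0 then (l.length:Int) else PySem.Int.mod c' (l.length:Int)) - 1) (l.length:Int)) with
      | none => rfl
      | some r =>
        have := PySem.List.length_of_pop?_eq_some l hp
        exact ih r.2 _ (by omega)
    · simp only [hg, if_false]

theorem pv_A_congr (c c' : Int) (h7 : 7 ≤ c) (h7' : 7 ≤ c') (hm : c % 60 = c' % 60) :
    flames_result c = flames_result c' := by
  unfold flames_result
  rw [pv_loopA_congr c c' h7 h7' hm 6 _ (by decide)]

theorem pv_B_congr (c c' : Int) (h7 : 7 ≤ c) (h7' : 7 ≤ c') (hm : c % 60 = c' % 60) :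
    flames_result_alt c = flames_result_alt c' := by
  unfold flames_result_alt
  rw [pv_loopB_congr c c' h7 h7' hm 6 _ 0 (by decide)]

-- ===== VERDICT (by name: the statement is the Claim_ definition above) =====
theorem flames_result_spec : Claim_equal_flames_result := by
  unfold Claim_equal_flames_result
  intro c _ hpre
  unfold Spec_flames_result
  unfold Pre_flames_result at hpre
  by_cases hc : c ≤ 66
  · have hk : (c - 1).toNat < 66 := by omega
    have h := pv_table _ hk
    have he : (((c - 1).toNat : Nat) : Int) + 1 = c := by omega
    rwa [he] at h
  · set c' := (c - 7) % 60 + 7 with hc'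
    have hb : 0 ≤ (c - 7) % 60 ∧ (c - 7) % 60 < 60 := by
      constructor
      · exact Int.emod_nonneg _ (by omega)
      · exact Int.emod_lt_of_pos _ (by omega)
    have hm : c % 60 = c' % 60 := by omega
    rw [pv_A_congr c c' (by omega) (by omega) hm,
        pv_B_congr c c' (by omega) (by omega) hm]
    have hk : (c' - 1).toNat < 66 := by omega
    have h := pv_table _ hk
    have he : (((c' - 1).toNat : Nat) : Int) + 1 = c' := by omega
    rwa [he] at h
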